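-- pv_equiv track=rewrite | github.com/vitorbaptista/rom-thumbnails-downloader | match_screenshots.py | apply_region_preference
-- ===== SOURCE A (Python) =====
-- from typing import Dict, List, Tuple, Optional, Generator
--
-- def apply_region_preference(entries: List[Tuple[str, str]]) -> Optional[str]:
--     """
--     Apply region preference to select the best image URL from multiple entries.
--
--     Preference order: USA -> Europe -> World -> Other (first encountered)
--
--     Args:
--         entries: List of (title, url) tuples for the same clean name
--
--     Returns:
--         The preferred image URL, or None if entries is empty
--     """
--     if not entries:
--         return None
--
--     if len(entries) == 1:
--         return entries[0][1]
--
--     # Check for USA preference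
--     for title, url in entries:
--         if 'usa' in title.lower():
--             return url
--
--     # Check for Europe preference
--     for title, url in entries:
--         if 'europe' in title.lower():
--             return url
--
--     # Check for World preference
--     for title, url in entries:
--         if 'world' in title.lower():
--             return url
--
--     # Return first entry if no preferred regions found
--     return entries[0][1]
-- ===== SOURCE B (Python) =====
-- from typing import List, Tuple, Optional
--
-- def apply_region_preference(entries: List[Tuple[str, str]]) -> Optional[str]:
--     if not entries:
--         return None
--     usa = europe = world = None
--     for title, url in entries:
--         t = title.lower()
--         if usa is None and 'usa' in t:
--             usa = url
--         if europe is None and 'europe' in t: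
--             europe = url
--         if world is None and 'world' in t:
--             world = url
--     if usa is not None:
--         return usa
--     if europe is not None:
--         return europe
--     if world is not None:
--         return world
--     return entries[0][1]
-- ===== Notes on version B (the rewrite author's own statement) =====
-- stated objective: simpler
-- what changed: Replaces A's three separate scans (plus a length-1 shortcut) with a single pass that records the first USA/Europe/World url in three variables and then picks by priority.
import Mathlib
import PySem

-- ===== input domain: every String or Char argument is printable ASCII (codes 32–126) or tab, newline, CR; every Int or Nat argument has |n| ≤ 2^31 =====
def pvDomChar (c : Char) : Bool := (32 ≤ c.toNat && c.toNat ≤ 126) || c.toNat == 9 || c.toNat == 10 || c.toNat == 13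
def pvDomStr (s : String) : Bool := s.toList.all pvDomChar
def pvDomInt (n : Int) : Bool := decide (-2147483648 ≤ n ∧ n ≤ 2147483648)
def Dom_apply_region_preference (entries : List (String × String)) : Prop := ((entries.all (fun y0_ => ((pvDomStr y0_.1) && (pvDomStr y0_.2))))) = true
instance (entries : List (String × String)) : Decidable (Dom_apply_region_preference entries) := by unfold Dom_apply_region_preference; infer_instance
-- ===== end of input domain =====

-- B is a single-pass re-decomposition of A (one loop, three first-match registers); same return value, no side effects.

-- ===== PORT A =====
-- predicate for "'usa' in title.lower()" etc. (shared vocabulary of both ports)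
def pvHasUsa (p : String × String) : Bool := PySem.Str.isIn "usa" (PySem.Str.lower p.1)
def pvHasEurope (p : String × String) : Bool := PySem.Str.isIn "europe" (PySem.Str.lower p.1)
def pvHasWorld (p : String × String) : Bool := PySem.Str.isIn "world" (PySem.Str.lower p.1)

def apply_region_preference (entries : List (String × String)) : Option String :=
  if entries.isEmpty then none
  else if entries.length = 1 then entries.head?.map (·.2)
  else
    match entries.find? pvHasUsa with            -- first for-loop with early return
    | some (_, url) => some url
    | none =>
      match entries.find? pvHasEurope with       -- second for-loop
      | some (_, url) => some url
      | none =>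
        match entries.find? pvHasWorld with      -- third for-loop
        | some (_, url) => some url
        | none => entries.head?.map (·.2)        -- entries[0][1]

-- ===== PORT B =====
-- the loop body: set each register that is still None when its keyword occurs
def pvStep (st : Option String × Option String × Option String) (p : String × String) :
    Option String × Option String × Option String :=
  ( if st.1.isNone && pvHasUsa p then some p.2 else st.1,
    if st.2.1.isNone && pvHasEurope p then some p.2 else st.2.1,
    if st.2.2.isNone && pvHasWorld p then some p.2 else st.2.2 )

def apply_region_preference_alt (entries : List (String × String)) : Option String :=
  match entries with
  | [] => none
  | e :: rest =>
    let r := (e :: rest).foldl pvStep (none, none, none)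
    match r.1 with
    | some u => some u
    | none =>
      match r.2.1 with
      | some u => some u
      | none =>
        match r.2.2 with
        | some u => some u
        | none => some e.2

-- ===== PRECONDITION & SPEC =====
def Spec_apply_region_preference (entries : List (String × String)) (out : Option String) : Prop := out = apply_region_preference_alt entries
instance (entries : List (String × String)) (out : Option String) : Decidable (Spec_apply_region_preference entries out) := by unfold Spec_apply_region_preference; infer_instance

-- ===== CLAIM (what is proved, stated in full; the proofs are below) =====
def Claim_equal_apply_region_preference : Prop := ∀ (entries : List (String × String)), Dom_apply_region_preference entries → Spec_apply_region_preference entries (apply_region_preference entries)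

-- ===== LEMMAS AND PROOFS =====

-- one register of the fold, in isolation
def pvReg (q : String × String → Bool) (acc : Option String) (l : List (String × String)) : Option String :=
  l.foldl (fun a x => if a.isNone && q x then some x.2 else a) acc

theorem pvReg_eq (q : String × String → Bool) (l : List (String × String)) :
    ∀ acc, pvReg q acc l = (acc.orElse (fun _ => (l.find? q).map Prod.snd)) := by
  induction l with
  | nil => intro acc; cases acc <;> simp [pvReg]
  | cons x xs ih =>
    intro acc
    cases acc with
    | some v => simpa [pvReg, List.foldl_cons] using ih (some v)
    | none =>
      by_cases h : q x = true
      · simpa [pvReg, List.foldl_cons, h, List.find?_cons] using ih (some x.2)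
      · have h' : q x = false := by simpa using h
        simpa [pvReg, List.foldl_cons, h', List.find?_cons] using ih none

-- the triple fold splits into three independent registers
theorem pvFold_split (l : List (String × String)) :
    ∀ u e w, l.foldl pvStep (u, e, w) = (pvReg pvHasUsa u l, pvReg pvHasEurope e l, pvReg pvHasWorld w l) := by
  induction l with
  | nil => intro u e w; simp [pvReg]
  | cons x xs ih => intro u e w; simp [List.foldl_cons, pvStep, pvReg, ih]

-- ===== VERDICT (by name: the statement is the Claim_ definition above) =====
theorem apply_region_preference_spec : Claim_equal_apply_region_preference := by
  intro entries _
  unfold Spec_apply_region_preference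
  cases entries with
  | nil => rfl
  | cons e rest =>
    have hsplit := pvFold_split (e :: rest) none none none
    cases rest with
    | nil =>
      simp only [apply_region_preference, apply_region_preference_alt, hsplit,
        pvReg_eq, Option.orElse, List.find?_cons, List.find?_nil]
      by_cases hu : pvHasUsa e = true <;>
        by_cases he : pvHasEurope e = true <;>
          by_cases hw : pvHasWorld e = true <;>
            simp [hu, he, hw]
    | cons x xs =>
      simp only [apply_region_preference, apply_region_preference_alt, hsplit,
        pvReg_eq, Option.orElse]
      have hlen : (e :: x :: xs).length ≠ 1 := by simp
      rcases hU : (e :: x :: xs).find? pvHasUsa with _ | pU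
      · rcases hE : (e :: x :: xs).find? pvHasEurope with _ | pE
        · rcases hW : (e :: x :: xs).find? pvHasWorld with _ | pW
          · simp [hW]
          · simp [hW]
        · simp [hE]
      · simp [hU]
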